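-- pv_equiv track=rewrite | github.com/yzooop/Algorithm | code/a.py | explode_bombs
-- ===== SOURCE A (Python) =====
-- def explode_bombs(grid, R, C):
--     new_grid = [['O'] * C for _ in range(R)]
--     for r in range(R):
--         for c in range(C):
--             if grid[r][c] == 'O':
--                 new_grid[r][c] = '.'
--                 if r > 0:
--                     new_grid[r - 1][c] = '.'
--                 if r < R - 1:
--                     new_grid[r + 1][c] = '.'
--                 if c > 0:
--                     new_grid[r][c - 1] = '.'
--                 if c < C - 1:
--                     new_grid[r][c + 1] = '.'
--     return new_grid
-- ===== SOURCE B (Python) =====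
-- def explode_bombs(grid, R, C):
--     def boom(r, c):
--         if grid[r][c] == 'O':
--             return True
--         if r > 0 and grid[r - 1][c] == 'O':
--             return True
--         if r < R - 1 and grid[r + 1][c] == 'O':
--             return True
--         if c > 0 and grid[r][c - 1] == 'O':
--             return True
--         if c < C - 1 and grid[r][c + 1] == 'O':
--             return True
--         return False
--     return [['.' if boom(r, c) else 'O' for c in range(C)] for r in range(R)]
-- ===== Notes on version B (the rewrite author's own statement) =====
-- stated objective: alternative
-- what changed: B is a gather pass that computes each output cell directly from whether it or any in-bounds neighbor holds a bomb, instead of A's scatter pass that pre-fills the grid with 'O' and overwrites the neighborhood of every bomb.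
import Mathlib
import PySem

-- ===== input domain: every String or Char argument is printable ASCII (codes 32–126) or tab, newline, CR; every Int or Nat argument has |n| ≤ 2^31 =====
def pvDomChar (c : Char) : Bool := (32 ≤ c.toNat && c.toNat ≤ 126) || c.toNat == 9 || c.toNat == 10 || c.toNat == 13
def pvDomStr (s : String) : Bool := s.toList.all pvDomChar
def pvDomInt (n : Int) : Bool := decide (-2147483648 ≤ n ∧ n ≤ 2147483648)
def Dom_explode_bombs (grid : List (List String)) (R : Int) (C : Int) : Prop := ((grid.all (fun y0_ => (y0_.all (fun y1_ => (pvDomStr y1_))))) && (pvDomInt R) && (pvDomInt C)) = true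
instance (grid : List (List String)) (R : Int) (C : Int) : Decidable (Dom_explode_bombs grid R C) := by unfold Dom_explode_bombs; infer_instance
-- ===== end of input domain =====

-- B is a gather pass: each output cell is computed directly from whether it or an
-- in-bounds neighbour holds a bomb, instead of A's scatter pass that pre-fills 'O'
-- and overwrites the neighbourhood of every bomb. Same cost; alternative algorithm.

-- ===== PORT A =====
-- new_grid[a][b] = v (Python's point assignment; out-of-range set is impossible inside the loops)
def pvSetCell (g : List (List String)) (a b : Nat) (v : String) : List (List String) :=
  g.set a ((g.getD a []).set b v)

-- body of A's inner loop for fixed r: the 'if grid[r][c] == O' block with its four guarded writes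
def pvBombStep (grid : List (List String)) (R C : Int) (r : Nat)
    (ng : List (List String)) (c : Nat) : List (List String) :=
  if (grid.getD r []).getD c "" = "O" then
    let ng1 := pvSetCell ng r c "."
    let ng2 := if 0 < r then pvSetCell ng1 (r - 1) c "." else ng1
    let ng3 := if (r : Int) < R - 1 then pvSetCell ng2 (r + 1) c "." else ng2
    let ng4 := if 0 < c then pvSetCell ng3 r (c - 1) "." else ng3
    if (c : Int) < C - 1 then pvSetCell ng4 r (c + 1) "." else ng4
  else ng

def explode_bombs (grid : List (List String)) (R : Int) (C : Int) : List (List String) :=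
  let new0 := (List.range R.toNat).map (fun _ => List.replicate C.toNat "O")
  (List.range R.toNat).foldl
    (fun ng r => (List.range C.toNat).foldl (pvBombStep grid R C r) ng) new0

-- ===== PORT B =====
-- Source B's boom(r, c): the if-chain over the cell and its in-bounds neighbours
def pvBoom (grid : List (List String)) (R C : Int) (r c : Nat) : Bool :=
  if (grid.getD r []).getD c "" = "O" then true
  else if 0 < r ∧ (grid.getD (r - 1) []).getD c "" = "O" then true
  else if (r : Int) < R - 1 ∧ (grid.getD (r + 1) []).getD c "" = "O" then true
  else if 0 < c ∧ (grid.getD r []).getD (c - 1) "" = "O" then true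
  else if (c : Int) < C - 1 ∧ (grid.getD r []).getD (c + 1) "" = "O" then true
  else false

def explode_bombs_alt (grid : List (List String)) (R : Int) (C : Int) : List (List String) :=
  (List.range R.toNat).map (fun r =>
    (List.range C.toNat).map (fun c => if pvBoom grid R C r c then "." else "O"))

-- ===== PRECONDITION & SPEC =====
-- Pre_ excludes exactly the inputs where Python A raises IndexError: when C > 0
-- the loops read grid[r][c] for every r < R, c < C, so grid needs at least R rows
-- and each of the first R rows needs at least C entries.
def Pre_explode_bombs (grid : List (List String)) (R : Int) (C : Int) : Prop :=
  (C ≤ 0 ∨ R ≤ (grid.length : Int)) ∧ ∀ row ∈ grid.take R.toNat, C ≤ (row.length : Int)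
instance (grid : List (List String)) (R : Int) (C : Int) : Decidable (Pre_explode_bombs grid R C) := by
  unfold Pre_explode_bombs; infer_instance

def pvWitness_explode_bombs : List (List String) × Int × Int :=
  ([["O", "."], [".", "."], [".", "x"]], 3, 2)

def Spec_explode_bombs (grid : List (List String)) (R : Int) (C : Int) (out : List (List String)) : Prop := out = explode_bombs_alt grid R C
instance (grid : List (List String)) (R : Int) (C : Int) (out : List (List String)) : Decidable (Spec_explode_bombs grid R C out) := by unfold Spec_explode_bombs; infer_instance

-- ===== CLAIM (what is proved, stated in full; the proofs are below) =====
def Claim_equal_explode_bombs : Prop := ∀ (grid : List (List String)) (R : Int) (C : Int), Dom_explode_bombs grid R C → Pre_explode_bombs grid R C → Spec_explode_bombs grid R C (explode_bombs grid R C)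

-- ===== LEMMAS AND PROOFS =====

-- the value of cell (i, j) of a grid (out of range reads give "")
def pvCell (g : List (List String)) (i j : Nat) : String := (g.getD i []).getD j ""

-- the grid has exactly R.toNat rows of C.toNat cells each
def pvShape (R C : Int) (g : List (List String)) : Prop :=
  g.length = R.toNat ∧ ∀ i < R.toNat, (g.getD i []).length = C.toNat

-- 'grid[r][c] == O'
def pvBombB (grid : List (List String)) (r c : Nat) : Bool :=
  (grid.getD r []).getD c "" == "O"

-- bomb at (r, c) writes '.' into (i, j)
def pvMarksB (R C : Int) (r c i j : Nat) : Bool :=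
  (i == r && j == c) || ((decide (0 < r) && (i + 1 == r && j == c))
  || ((decide ((r : Int) < R - 1) && (i == r + 1 && j == c))
  || ((decide (0 < c) && (i == r && j + 1 == c))
  || (decide ((c : Int) < C - 1) && (i == r && j == c + 1)))))

theorem getD_set_row (g : List (List String)) (a : Nat) (x : List String) (i : Nat) :
    ((g.set a x).getD i []) = if i = a ∧ a < g.length then x else g.getD i [] := by
  simp only [List.getD, List.getElem?_set]
  split_ifs with h1 h2 h3 <;> simp_all <;> omega

theorem cell_setCell (g : List (List String)) (a b : Nat) (v : String) (i j : Nat)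
    (ha : a < g.length) (hb : b < (g.getD a []).length) :
    pvCell (pvSetCell g a b v) i j = if i = a ∧ j = b then v else pvCell g i j := by
  simp only [pvCell, pvSetCell, getD_set_row]
  by_cases hia : i = a
  · subst hia
    rw [if_pos ⟨rfl, ha⟩]
    simp only [List.getD, List.getElem?_set]
    by_cases hjb : j = b
    · subst hjb
      simp only [List.getD] at hb
      simp [hb]
    · simp [hjb, Ne.symm hjb]
  · rw [if_neg (by tauto), if_neg (by tauto)]

theorem shape_setCell (R C : Int) (g : List (List String)) (a b : Nat) (v : String)
    (h : pvShape R C g) : pvShape R C (pvSetCell g a b v) := by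
  obtain ⟨h1, h2⟩ := h
  refine ⟨by simp [pvSetCell, h1], fun i hi => ?_⟩
  rw [pvSetCell, getD_set_row]
  split_ifs with hcond
  · obtain ⟨rfl, _⟩ := hcond
    rw [List.length_set]
    exact h2 _ hi
  · exact h2 i hi

theorem shape_gset (R C : Int) (p : Prop) [Decidable p] (g : List (List String)) (a b : Nat)
    (h : pvShape R C g) : pvShape R C (if p then pvSetCell g a b "." else g) := by
  split_ifs
  · exact shape_setCell _ _ _ _ _ _ h
  · exact h

theorem cell_gset (R C : Int) (p : Prop) [Decidable p] (g : List (List String)) (a b i j : Nat)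
    (h : pvShape R C g) (hab : p → a < R.toNat ∧ b < C.toNat) :
    pvCell (if p then pvSetCell g a b "." else g) i j =
      if p ∧ i = a ∧ j = b then "." else pvCell g i j := by
  by_cases hp : p
  · have hA : a < g.length := by rw [h.1]; exact (hab hp).1
    have hB : b < (g.getD a []).length := by rw [h.2 a (hab hp).1]; exact (hab hp).2
    rw [if_pos hp, cell_setCell _ _ _ _ _ _ hA hB]
    by_cases hij : i = a ∧ j = b
    · rw [if_pos hij, if_pos ⟨hp, hij.1, hij.2⟩]
    · rw [if_neg hij, if_neg (by tauto)]
  · rw [if_neg hp, if_neg (by tauto)]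

theorem shape_bombStep (grid : List (List String)) (R C : Int) (r : Nat)
    (ng : List (List String)) (c : Nat) (h : pvShape R C ng) :
    pvShape R C (pvBombStep grid R C r ng c) := by
  simp only [pvBombStep]
  split_ifs <;> (repeat apply shape_setCell) <;> exact h

theorem cell_bombStep (grid : List (List String)) (R C : Int) (r : Nat)
    (ng : List (List String)) (c : Nat) (h : pvShape R C ng)
    (hr : r < R.toNat) (hc : c < C.toNat) (i j : Nat) :
    pvCell (pvBombStep grid R C r ng c) i j =
      if (pvBombB grid r c && pvMarksB R C r c i j) = true then "." else pvCell ng i j := by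
  by_cases hb : (grid.getD r []).getD c "" = "O"
  · have hbB : pvBombB grid r c = true := by simp only [pvBombB, beq_iff_eq]; exact hb
    simp only [pvBombStep]
    rw [if_pos hb]
    set g1 := pvSetCell ng r c "." with hg1
    set g2 := if 0 < r then pvSetCell g1 (r - 1) c "." else g1 with hg2
    set g3 := if (r : Int) < R - 1 then pvSetCell g2 (r + 1) c "." else g2 with hg3
    set g4 := if 0 < c then pvSetCell g3 r (c - 1) "." else g3 with hg4
    have h1 : pvShape R C g1 := by rw [hg1]; exact shape_setCell _ _ _ _ _ _ h
    have h2 : pvShape R C g2 := by rw [hg2]; exact shape_gset _ _ _ _ _ _ h1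
    have h3 : pvShape R C g3 := by rw [hg3]; exact shape_gset _ _ _ _ _ _ h2
    have h4 : pvShape R C g4 := by rw [hg4]; exact shape_gset _ _ _ _ _ _ h3
    rw [cell_gset R C _ g4 r (c + 1) i j h4 (fun _ => ⟨hr, by omega⟩)]
    rw [hg4, cell_gset R C _ g3 r (c - 1) i j h3 (fun _ => ⟨hr, by omega⟩)]
    rw [hg3, cell_gset R C _ g2 (r + 1) c i j h2 (fun hp => ⟨by omega, hc⟩)]
    rw [hg2, cell_gset R C _ g1 (r - 1) c i j h1 (fun _ => ⟨by omega, hc⟩)]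
    rw [hg1, cell_setCell _ _ _ _ _ _ (by rw [h.1]; exact hr) (by rw [h.2 r hr]; exact hc)]
    simp only [hbB, Bool.true_and, pvMarksB, Bool.or_eq_true, Bool.and_eq_true,
      decide_eq_true_iff, beq_iff_eq]
    split_ifs <;> first | rfl | omega | (exfalso; omega)
  · have hbB : pvBombB grid r c = false := by
      simp only [pvBombB, beq_eq_false_iff_ne, ne_eq]; exact hb
    simp only [pvBombStep]
    rw [if_neg hb]
    simp [hbB]

theorem shape_inner (grid : List (List String)) (R C : Int) (r : Nat)
    (ng : List (List String)) (l : List Nat) (h : pvShape R C ng) :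
    pvShape R C (l.foldl (pvBombStep grid R C r) ng) := by
  induction l generalizing ng with
  | nil => exact h
  | cons x xs ih => exact ih _ (shape_bombStep _ _ _ _ _ _ h)

theorem cell_inner (grid : List (List String)) (R C : Int) (r : Nat)
    (ng : List (List String)) (n : Nat) (h : pvShape R C ng)
    (hr : r < R.toNat) (hn : n ≤ C.toNat) (i j : Nat) :
    pvCell ((List.range n).foldl (pvBombStep grid R C r) ng) i j =
      if (List.range n).any (fun c => pvBombB grid r c && pvMarksB R C r c i j) = true
      then "." else pvCell ng i j := by
  induction n with
  | zero => simp
  | succ m ih =>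
    rw [List.range_succ, List.foldl_append, List.any_append]
    simp only [List.foldl_cons, List.foldl_nil, List.any_cons, List.any_nil]
    rw [cell_bombStep _ _ _ _ _ _ (shape_inner _ _ _ _ _ _ h) hr (by omega),
        ih (by omega)]
    by_cases hm : (pvBombB grid r m && pvMarksB R C r m i j) = true
    · simp [hm]
    · simp only [Bool.not_eq_true] at hm
      simp only [hm, Bool.or_false, Bool.false_or, Bool.or_self]
      simp
    
theorem shape_outer (grid : List (List String)) (R C : Int)
    (ng : List (List String)) (l : List Nat) (h : pvShape R C ng) :
    pvShape R C (l.foldl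
      (fun ng r => (List.range C.toNat).foldl (pvBombStep grid R C r) ng) ng) := by
  induction l generalizing ng with
  | nil => exact h
  | cons x xs ih => exact ih _ (shape_inner _ _ _ _ _ _ h)

theorem cell_outer (grid : List (List String)) (R C : Int)
    (ng : List (List String)) (m : Nat) (h : pvShape R C ng) (hm : m ≤ R.toNat) (i j : Nat) :
    pvCell ((List.range m).foldl
        (fun ng r => (List.range C.toNat).foldl (pvBombStep grid R C r) ng) ng) i j =
      if (List.range m).any (fun r => (List.range C.toNat).any
            (fun c => pvBombB grid r c && pvMarksB R C r c i j)) = true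
      then "." else pvCell ng i j := by
  induction m with
  | zero => simp
  | succ k ih =>
    rw [List.range_succ, List.foldl_append, List.any_append]
    simp only [List.foldl_cons, List.foldl_nil, List.any_cons, List.any_nil]
    rw [cell_inner _ _ _ _ _ _ (shape_outer grid R C ng (List.range k) h) (by omega) (le_refl _),
        ih (by omega)]
    by_cases hk : ((List.range C.toNat).any
        (fun c => pvBombB grid k c && pvMarksB R C k c i j)) = true
    · simp [hk]
    · simp only [Bool.not_eq_true] at hk
      simp only [hk, Bool.or_false, Bool.false_or, Bool.or_self]
      simp

theorem shape_new0 (R C : Int) :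
    pvShape R C ((List.range R.toNat).map (fun _ => List.replicate C.toNat "O")) := by
  constructor
  · simp
  · intro i hi
    rw [List.getD, List.getElem?_map]
    simp [List.getElem?_range hi]

theorem cell_new0 (R C : Int) (i j : Nat) (hi : i < R.toNat) (hj : j < C.toNat) :
    pvCell ((List.range R.toNat).map (fun _ => List.replicate C.toNat "O")) i j = "O" := by
  have hrow : ((List.range R.toNat).map (fun _ => List.replicate C.toNat "O")).getD i []
      = List.replicate C.toNat "O" := by
    simp [List.getD, List.getElem?_map, List.getElem?_range, hi]
  rw [pvCell, hrow]
  simp [List.getD, List.getElem?_replicate, hj]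

-- the gather condition at (i, j) equals "some bomb in range marks (i, j)"
theorem any_eq_boom (grid : List (List String)) (R C : Int) (i j : Nat)
    (hi : i < R.toNat) (hj : j < C.toNat) :
    ((List.range R.toNat).any (fun r => (List.range C.toNat).any
        (fun c => pvBombB grid r c && pvMarksB R C r c i j))) =
      pvBoom grid R C i j := by
  rw [Bool.eq_iff_iff]
  simp only [List.any_eq_true, List.mem_range, pvMarksB, Bool.or_eq_true, Bool.and_eq_true,
    decide_eq_true_iff, pvBombB, beq_iff_eq]
  constructor
  · rintro ⟨r, hr, c, hc, hb, hm⟩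
    rcases hm with ⟨rfl, rfl⟩ | ⟨h0, he, rfl⟩ | ⟨hR, rfl, rfl⟩ | ⟨h0, he, rfl⟩ | ⟨hC, rfl, rfl⟩
    · unfold pvBoom
      rw [if_pos hb]
    · -- bomb below: r = i + 1
      subst he
      unfold pvBoom
      have hR' : (i : Int) < R - 1 := by omega
      split_ifs <;> simp_all
    · -- bomb above: i = r + 1, so r = i - 1, 0 < i
      unfold pvBoom
      have h0i : 0 < r + 1 := by omega
      have : r + 1 - 1 = r := by omega
      split_ifs <;> simp_all
    · subst he
      unfold pvBoom
      have hC' : (j : Int) < C - 1 := by omega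
      split_ifs <;> simp_all
    · unfold pvBoom
      have : c + 1 - 1 = c := by omega
      split_ifs <;> simp_all
  · intro hb
    unfold pvBoom at hb
    by_cases b1 : (grid.getD i []).getD j "" = "O"
    · exact ⟨i, hi, j, hj, b1, Or.inl ⟨rfl, rfl⟩⟩
    by_cases b2 : 0 < i ∧ (grid.getD (i - 1) []).getD j "" = "O"
    · exact ⟨i - 1, by omega, j, hj, b2.2, Or.inr (Or.inr (Or.inl ⟨by omega, by omega, rfl⟩))⟩
    by_cases b3 : (i : Int) < R - 1 ∧ (grid.getD (i + 1) []).getD j "" = "O"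
    · exact ⟨i + 1, by omega, j, hj, b3.2, Or.inr (Or.inl ⟨by omega, by omega, rfl⟩)⟩
    by_cases b4 : 0 < j ∧ (grid.getD i []).getD (j - 1) "" = "O"
    · exact ⟨i, hi, j - 1, by omega, b4.2,
        Or.inr (Or.inr (Or.inr (Or.inr ⟨by omega, rfl, by omega⟩)))⟩
    by_cases b5 : (j : Int) < C - 1 ∧ (grid.getD i []).getD (j + 1) "" = "O"
    · exact ⟨i, hi, j + 1, by omega, b5.2,
        Or.inr (Or.inr (Or.inr (Or.inl ⟨by omega, rfl, by omega⟩)))⟩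
    · exfalso; rw [if_neg b1, if_neg b2, if_neg b3, if_neg b4, if_neg b5] at hb; exact absurd hb (by decide)

theorem explode_eq (grid : List (List String)) (R C : Int) :
    explode_bombs grid R C = explode_bombs_alt grid R C := by
  have hshape : pvShape R C (explode_bombs grid R C) := by
    unfold explode_bombs
    exact shape_outer _ _ _ _ _ (shape_new0 R C)
  have hcell : ∀ i j, i < R.toNat → j < C.toNat →
      pvCell (explode_bombs grid R C) i j = if pvBoom grid R C i j then "." else "O" := by
    intro i j hi hj
    unfold explode_bombs
    rw [cell_outer _ _ _ _ _ (shape_new0 R C) (le_refl _),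
        cell_new0 R C i j hi hj, any_eq_boom grid R C i j hi hj]
  apply List.ext_getElem
  · rw [hshape.1]; simp [explode_bombs_alt]
  · intro i h1 h2
    have hi : i < R.toNat := by rw [← hshape.1]; exact h1
    apply List.ext_getElem
    · have := hshape.2 i hi
      rw [List.getD, List.getElem?_eq_getElem h1, Option.getD_some] at this
      rw [this]
      simp [explode_bombs_alt, List.getElem_map, List.getElem_range]
    · intro j hj1 hj2
      have hrow : (explode_bombs grid R C)[i] = (explode_bombs grid R C).getD i [] := by
        rw [List.getD, List.getElem?_eq_getElem h1, Option.getD_some]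
      have hlen : j < C.toNat := by
        have := hshape.2 i hi
        rw [List.getD, List.getElem?_eq_getElem h1, Option.getD_some] at this
        omega
      have := hcell i j hi hlen
      rw [pvCell, ← hrow] at this
      rw [List.getD, List.getElem?_eq_getElem hj1, Option.getD_some] at this
      rw [this]
      simp [explode_bombs_alt, List.getElem_map, List.getElem_range]

-- ===== VERDICT (by name: the statement is the Claim_ definition above) =====
theorem explode_bombs_spec : Claim_equal_explode_bombs := by
  intro grid R C _ _
  unfold Spec_explode_bombs
  exact explode_eq grid R C
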